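-- pv_equiv track=rewrite | github.com/DeveloperYard/algorithm | programmers/lv2_롤케이크 자르기.py | solution
-- ===== SOURCE A (Python) =====
-- def solution(topping):
--     answer = 0
--
--     ch = dict()
--     do = dict()
--
--     for i in range(len(topping)):
--         if topping[i] in ch:
--             ch[topping[i]] += 1
--         else:
--             ch[topping[i]] = 1
--
--     idx = len(topping)-1
--     while 1:
--         if topping[idx] not in do:  # 동생이 가지고 있는 토핑 리스트에 없는 경우
--             do[topping[idx]] = 1  # 추가
--             if topping[idx] in ch:  # 철수한테 있었다면 하나를 빼고, 0개라면 없애버림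
--                 ch[topping[idx]] -= 1
--                 if ch[topping[idx]] == 0:
--                     del ch[topping[idx]]
--         else:
--             do[topping[idx]] += 1
--             if topping[idx] in ch:
--                 ch[topping[idx]] -= 1
--                 if ch[topping[idx]] == 0:
--                     del ch[topping[idx]]
--
--         idx -= 1
--         if len(ch) == len(do):  # 토핑의 개수가 같다면 답에 하나 추가
--             answer += 1
--         elif len(ch) < len(do): # 동생의 토핑이 더 많을 경우 break
--             break
--
--     return answer  # 이렇게 하면 실행시간이 너무 길어짐!!! 다른 방법을 찾자.
-- ===== SOURCE B (Python) =====
-- def solution(topping):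
--     # Precompute suffix distinct counts, then one forward pass with a left set.
--     suffix = []
--     seen = set()
--     for x in reversed(topping):
--         seen.add(x)
--         suffix.append(len(seen))
--     suffix.reverse()
--     ans = 0
--     left = set()
--     for x, s in zip(topping, suffix[1:]):
--         left.add(x)
--         if len(left) == s:
--             ans += 1
--     return ans
-- ===== Notes on version B (the rewrite author's own statement) =====
-- stated objective: alternative
-- what changed: Replaces A's two live count-dicts updated right-to-left with an early break by a precomputed suffix distinct-count table plus a single forward pass with a growing left set.
import Mathlib
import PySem

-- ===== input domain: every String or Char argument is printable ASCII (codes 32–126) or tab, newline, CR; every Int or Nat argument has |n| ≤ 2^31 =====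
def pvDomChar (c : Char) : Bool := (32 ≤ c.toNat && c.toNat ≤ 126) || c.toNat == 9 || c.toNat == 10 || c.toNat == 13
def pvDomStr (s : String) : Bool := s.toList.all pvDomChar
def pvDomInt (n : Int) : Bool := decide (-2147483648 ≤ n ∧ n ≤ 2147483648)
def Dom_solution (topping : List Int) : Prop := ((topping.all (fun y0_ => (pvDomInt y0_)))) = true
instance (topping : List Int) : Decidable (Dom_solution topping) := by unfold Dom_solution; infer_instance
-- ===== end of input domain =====

-- B replaces A's two live count-dicts (scanned right-to-left with an early break) by a
-- precomputed suffix distinct-count table plus one forward pass with a growing left set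
-- (objective: alternative decomposition, same O(n) cost).

-- ===== PORT A =====
-- the ch-decrement-and-delete block; Python repeats this code verbatim in both branches
-- of the `topping[idx] not in do` test, so it is a helper used twice
def pvDecDel (ch : PySem.Dict Int Int) (x : Int) : PySem.Dict Int Int :=
  if ch.contains x then
    let ch2 := ch.insert x (ch.getD x 0 - 1)
    if ch2.getD x 0 = 0 then ch2.erase x else ch2
  else ch

-- the `while 1` loop; it walks topping[idx] for idx = n-1, n-2, …, i.e. over topping.reverse.
-- On [] Python would wrap to negative indices (IndexError on empty `topping[-1]`); that
-- input is excluded by Pre_solution, and for nonempty input the break always fires by idx = 0.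
def pvLoopA : List Int → PySem.Dict Int Int → PySem.Dict Int Int → Int → Int
  | [], _, _, ans => ans
  | x :: rest, ch, don, ans =>
    let don2 := if don.contains x = false then don.insert x 1 else don.insert x (don.getD x 0 + 1)
    let ch2 := pvDecDel ch x
    if ch2.size = don2.size then pvLoopA rest ch2 don2 (ans + 1)
    else if ch2.size < don2.size then ans
    else pvLoopA rest ch2 don2 ans

def solution (topping : List Int) : Int :=
  -- first loop: for i in range(len(topping)): count topping[i] into ch
  -- (topping[i] never raises here; pyGetD's default 0 is never used)
  let ch := (PySem.List.pyRange 0 (PySem.List.len topping)).foldl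
    (fun ch i =>
      let x := PySem.List.pyGetD topping i 0
      if ch.contains x then ch.insert x (ch.getD x 0 + 1) else ch.insert x 1)
    PySem.Dict.empty
  pvLoopA topping.reverse ch PySem.Dict.empty 0

-- ===== PORT B =====
-- for x in reversed(topping): seen.add(x); suffix.append(len(seen))
def pvSuffix : List Int → PySem.Set Int → List Int
  | [], _ => []
  | x :: rest, seen =>
    let s := PySem.Set.add seen x
    PySem.Set.len s :: pvSuffix rest s

-- for x, s in zip(topping, suffix[1:]): left.add(x); if len(left) == s: ans += 1
def pvFwd : List (Int × Int) → PySem.Set Int → Int → Int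
  | [], _, ans => ans
  | (x, s) :: rest, left, ans =>
    let l := PySem.Set.add left x
    if PySem.Set.len l = s then pvFwd rest l (ans + 1) else pvFwd rest l ans

def solution_alt (topping : List Int) : Int :=
  let suffix := (pvSuffix topping.reverse PySem.Set.empty).reverse
  pvFwd (topping.zip (PySem.List.slice suffix (some 1) none)) PySem.Set.empty 0

-- ===== PRECONDITION & SPEC =====
-- Pre_ excludes only the empty list, on which A raises IndexError (topping[-1]); B returns 0 there.
def Pre_solution (topping : List Int) : Prop := topping ≠ []
instance (topping : List Int) : Decidable (Pre_solution topping) := by unfold Pre_solution; infer_instance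
def pvWitness_solution : List Int := [1, 2, 1, 3]

def Spec_solution (topping : List Int) (out : Int) : Prop := out = solution_alt topping
instance (topping : List Int) (out : Int) : Decidable (Spec_solution topping out) := by unfold Spec_solution; infer_instance

-- ===== CLAIM (what is proved, stated in full; the proofs are below) =====
def Claim_equal_solution : Prop := ∀ (topping : List Int), Dom_solution topping → Pre_solution topping → Spec_solution topping (solution topping)

-- ===== LEMMAS AND PROOFS =====

-- number of distinct elements of a list (the abstract value both programs track)
def pvD (l : List Int) : ℕ := l.toFinset.card

theorem pvSet_len_ofList (l : List Int) : (PySem.Set.ofList l).length = pvD l := by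
  have nd := PySem.Set.nodup_ofList l
  have hfs : (PySem.Set.ofList l).toFinset = l.toFinset := by
    ext y; simp [PySem.Set.mem_ofList]
  rw [pvD, ← hfs, List.toFinset_card_of_nodup nd]

theorem pvOfList_snoc (l : List Int) (x : Int) :
    PySem.Set.ofList (l ++ [x]) = PySem.Set.add (PySem.Set.ofList l) x := by
  simp [PySem.Set.ofList_eq_foldl]

theorem pvGetD_zero_of_not_contains (d : PySem.Dict Int Int) (x : Int)
    (h : d.contains x = false) : d.getD x 0 = 0 := by
  simp only [PySem.Dict.contains, List.any_eq_false] at h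
  simp [PySem.Dict.getD, PySem.Dict.get?, List.find?_eq_none.mpr (by intro p hp; exact h p hp)]

theorem pvCounter_snoc (l : List Int) (x : Int) :
    PySem.Dict.counter (l ++ [x])
      = (PySem.Dict.counter l).insert x ((PySem.Dict.counter l).getD x 0 + 1) := by
  simpa [PySem.Dict.modify] using PySem.Dict.counter_append_singleton l x

theorem pvCounter_size (l : List Int) : (PySem.Dict.counter l).size = pvD l := by
  rw [PySem.Dict.size, PySem.Dict.items_counter, List.length_map, pvSet_len_ofList]

theorem pvDecDel_counter (l : List Int) (x : Int) :
    pvDecDel (PySem.Dict.counter (l ++ [x])) x = PySem.Dict.counter l := by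
  rw [pvDecDel, pvCounter_snoc]
  have hc : (((PySem.Dict.counter l).insert x ((PySem.Dict.counter l).getD x 0 + 1)).contains x) = true := by
    simp
  rw [if_pos hc]
  simp [PySem.Dict.getD_counter, PySem.Dict.insert_insert_self]
  by_cases hx : x ∈ l
  · have hcnt : l.count x ≠ 0 := by
      have := List.count_pos_iff.mpr hx; omega
    rw [if_neg (by exact_mod_cast hcnt)]
    apply PySem.Dict.ext
    have hct : ((PySem.Dict.counter l).contains x) = true := by
      simp [PySem.Dict.contains_counter, hx]
    simp only [PySem.Dict.insert, hct, PySem.Dict.items_counter]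
    rw [List.map_map]
    apply List.map_congr_left
    intro k hk
    by_cases hkx : k = x
    · subst hkx; simp
    · simp [hkx]
  · have hcnt : l.count x = 0 := List.count_eq_zero.mpr hx
    rw [hcnt]
    norm_num
    apply PySem.Dict.ext
    have hct : ((PySem.Dict.counter l).contains x) = false := by
      simp [PySem.Dict.contains_counter, hx]
    simp only [PySem.Dict.insert, hct, Bool.false_eq_true, if_false, PySem.Dict.erase]
    show (((PySem.Dict.counter l).items ++ [(x, (0:Int))]).filter (fun p => !(p.1 == x))) = _
    rw [List.filter_append]
    have h1 : ((PySem.Dict.counter l).items.filter (fun p => !(p.1 == x))) = (PySem.Dict.counter l).items := by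
      apply List.filter_eq_self.mpr
      intro p hp
      have hmem : p.1 ∈ (PySem.Dict.counter l).items.map Prod.fst := List.mem_map_of_mem hp
      rw [show (PySem.Dict.counter l).items.map Prod.fst = (PySem.Dict.counter l).keys from rfl,
        PySem.Dict.keys_counter] at hmem
      have hpl : p.1 ∈ l := (PySem.Set.mem_ofList l p.1).mp hmem
      simp; intro h; exact hx (h ▸ hpl)
    rw [h1]; simp

theorem pvDonStep (sr : List Int) (x : Int) :
    (if (PySem.Dict.counter sr).contains x = false then (PySem.Dict.counter sr).insert x 1
      else (PySem.Dict.counter sr).insert x ((PySem.Dict.counter sr).getD x 0 + 1))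
      = PySem.Dict.counter (sr ++ [x]) := by
  rw [pvCounter_snoc]
  by_cases h : (PySem.Dict.counter sr).contains x = false
  · rw [if_pos h, pvGetD_zero_of_not_contains _ _ h]; norm_num
  · rw [if_neg h]

theorem pvChBuild (topping : List Int) :
    ((PySem.List.pyRange 0 (PySem.List.len topping)).foldl
      (fun ch i =>
        let x := PySem.List.pyGetD topping i 0
        if ch.contains x then ch.insert x (ch.getD x 0 + 1) else ch.insert x 1)
      PySem.Dict.empty) = PySem.Dict.counter topping := by
  have hfn : (fun (ch : PySem.Dict Int Int) (x : Int) =>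
      if ch.contains x then ch.insert x (ch.getD x 0 + 1) else ch.insert x 1)
      = fun ch x => ch.insert x (ch.getD x 0 + 1) := by
    funext ch x
    by_cases h : ch.contains x
    · rw [if_pos h]
    · rw [if_neg h, pvGetD_zero_of_not_contains _ _ (by simpa using h)]; norm_num
  rw [PySem.List.foldl_pyRange_pyGetD topping 0
      (fun (ch : PySem.Dict Int Int) (x : Int) =>
        if ch.contains x then ch.insert x (ch.getD x 0 + 1) else ch.insert x 1)
      PySem.Dict.empty (le_refl 0)]
  rw [hfn]
  simpa using PySem.Dict.foldl_insert_getD_add_one_eq_counter topping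

-- abstract form of A's loop
def pvG : List Int → List Int → Int
  | [], _ => 0
  | x :: r', sr =>
    if pvD r'.reverse = pvD (sr ++ [x]) then 1 + pvG r' (sr ++ [x])
    else if pvD r'.reverse < pvD (sr ++ [x]) then 0
    else pvG r' (sr ++ [x])

theorem pvLoopA_eq (r : List Int) : ∀ (sr : List Int) (ans : Int),
    pvLoopA r (PySem.Dict.counter r.reverse) (PySem.Dict.counter sr) ans = ans + pvG r sr := by
  induction r with
  | nil => intro sr ans; simp [pvLoopA, pvG]
  | cons x r' ih =>
    intro sr ans
    have hrev : (x :: r').reverse = r'.reverse ++ [x] := by simp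
    simp only [pvLoopA, pvG, hrev, pvDecDel_counter, pvDonStep, pvCounter_size]
    split_ifs with h1 h2
    · rw [ih]; ring
    · omega
    · rw [ih]

theorem pvSubset_toFinset {l m : List Int} (h : l ⊆ m) : l.toFinset ⊆ m.toFinset := by
  intro a ha; simp only [List.mem_toFinset] at *; exact h ha

theorem pvMono_take (xs : List Int) {k j : ℕ} (h : k ≤ j) : pvD (xs.take k) ≤ pvD (xs.take j) := by
  exact Finset.card_le_card (pvSubset_toFinset (List.take_prefix_take_left h).subset)

theorem pvMono_drop (xs : List Int) {k j : ℕ} (h : k ≤ j) : pvD (xs.drop j) ≤ pvD (xs.drop k) := by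
  have : xs.drop j = (xs.drop k).drop (j - k) := by rw [List.drop_drop]; congr 1; omega
  rw [this]
  exact Finset.card_le_card (pvSubset_toFinset (List.drop_subset _ _))

theorem pvG_eq (xs : List Int) : ∀ (j : ℕ) (sr : List Int), j ≤ xs.length →
    sr.toFinset = (xs.drop j).toFinset →
    pvG ((xs.take j).reverse) sr
      = (((List.range j).filter (fun k => decide (pvD (xs.take k) = pvD (xs.drop k)))).length : Int) := by
  intro j
  induction j with
  | zero => intro sr _ _; simp [pvG]
  | succ j ih =>
    intro sr hj hsr
    have hjn : j < xs.length := by omega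
    have htake : xs.take (j+1) = xs.take j ++ [xs[j]] := List.take_succ_eq_append_getElem hjn
    have hdropj : xs.drop j = xs[j] :: xs.drop (j+1) := List.drop_eq_getElem_cons hjn
    have hsr' : (sr ++ [xs[j]]).toFinset = (xs.drop j).toFinset := by
      ext a
      simp only [List.mem_toFinset, List.mem_append, hdropj, List.mem_cons]
      have := Finset.ext_iff.mp hsr a
      simp only [List.mem_toFinset] at this
      tauto
    have hD : pvD (sr ++ [xs[j]]) = pvD (xs.drop j) := by rw [pvD, pvD, hsr']
    rw [htake, List.reverse_append]
    simp only [List.reverse_cons, List.reverse_nil, List.nil_append, List.singleton_append]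
    simp only [pvG, List.reverse_reverse, hD]
    split_ifs with h1 h2
    · rw [ih _ hjn.le hsr']
      rw [List.range_succ, List.filter_append]
      simp [h1]
      ring
    · -- break: every k ≤ j fails the equality
      have hall : ∀ k ∈ List.range (j+1), ¬ (pvD (xs.take k) = pvD (xs.drop k)) := by
        intro k hk
        rw [List.mem_range] at hk
        have h1 : pvD (xs.take k) ≤ pvD (xs.take j) := pvMono_take xs (by omega)
        have h2 : pvD (xs.drop j) ≤ pvD (xs.drop k) := pvMono_drop xs (by omega)
        omega
      have : (List.range (j+1)).filter (fun k => decide (pvD (xs.take k) = pvD (xs.drop k))) = [] := by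
        rw [List.filter_eq_nil_iff]
        intro k hk
        simpa using hall k hk
      rw [this]; rfl
    · rw [ih _ hjn.le hsr']
      rw [List.range_succ, List.filter_append]
      have : ¬ (pvD (xs.take j) = pvD (xs.drop j)) := by omega
      simp [this]

theorem pvSuffix_spec (l : List Int) : ∀ (s : PySem.Set Int),
    pvSuffix l s = (List.range l.length).map (fun j => PySem.Set.len (PySem.Set.update s (l.take (j+1)))) := by
  induction l with
  | nil => intro s; simp [pvSuffix]
  | cons x rest ih =>
    intro s
    simp only [pvSuffix, List.length_cons, List.range_succ_eq_map, List.map_cons, List.map_map]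
    congr 1
    rw [ih (PySem.Set.add s x)]
    apply List.map_congr_left
    intro j hj
    simp [Function.comp, PySem.Set.update]

theorem pvSuffix_reverse (xs : List Int) :
    (pvSuffix xs.reverse PySem.Set.empty).reverse
      = (List.range xs.length).map (fun i => (pvD (xs.drop i) : Int)) := by
  rw [pvSuffix_spec]
  apply List.ext_getElem
  · simp
  · intro i h1 h2
    simp only [List.length_reverse, List.length_map, List.length_range, List.length_reverse] at h1 h2
    rw [List.getElem_reverse]
    simp only [List.length_map, List.length_range]
    rw [List.getElem_map, List.getElem_map, List.getElem_range, List.getElem_range]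
    have hlen : xs.reverse.length = xs.length := List.length_reverse
    have hix : xs.length - 1 - i + 1 = xs.length - i := by omega
    rw [hlen, hix]
    have htr : xs.reverse.take (xs.length - i) = (xs.drop i).reverse := by
      have hi : i < xs.length := by simpa using h2
      have hnn : xs.length - (xs.length - i) = i := by omega
      rw [List.take_reverse (xs := xs) (i := xs.length - i), hnn]
    rw [htr]
    have : PySem.Set.update PySem.Set.empty (xs.drop i).reverse = PySem.Set.ofList (xs.drop i).reverse := rfl
    rw [this, PySem.Set.len]
    rw [pvSet_len_ofList]
    congr 1
    rw [pvD, pvD, List.toFinset_reverse]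

theorem pvFwd_spec (xs : List Int) : ∀ (m j : ℕ) (a : Int), j + m ≤ xs.length →
    pvFwd ((xs.drop j).zip ((List.range' (j+1) m).map (fun i => (pvD (xs.drop i) : Int))))
        (PySem.Set.ofList (xs.take j)) a
      = a + (((List.range' (j+1) m).filter (fun k => decide (pvD (xs.take k) = pvD (xs.drop k)))).length : Int) := by
  intro m
  induction m with
  | zero => intro j a _; simp [pvFwd]
  | succ m ih =>
    intro j a hjm
    have hjn : j < xs.length := by omega
    have hdropj : xs.drop j = xs[j] :: xs.drop (j+1) := List.drop_eq_getElem_cons hjn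
    have htake : xs.take (j+1) = xs.take j ++ [xs[j]] := List.take_succ_eq_append_getElem hjn
    rw [List.range'_succ, hdropj]
    simp only [List.map_cons, List.zip_cons_cons, pvFwd]
    have hadd : PySem.Set.add (PySem.Set.ofList (xs.take j)) xs[j] = PySem.Set.ofList (xs.take (j+1)) := by
      rw [htake, pvOfList_snoc]
    rw [hadd]
    have hlen : PySem.Set.len (PySem.Set.ofList (xs.take (j+1))) = (pvD (xs.take (j+1)) : Int) := by
      rw [PySem.Set.len, pvSet_len_ofList]
    rw [hlen, List.filter_cons]
    by_cases hc : pvD (xs.take (j+1)) = pvD (xs.drop (j+1))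
    · rw [if_pos (by exact_mod_cast hc)]
      have : (decide (pvD (xs.take (j+1)) = pvD (xs.drop (j+1)))) = true := by simp [hc]
      rw [this]
      rw [ih (j+1) (a+1) (by omega)]
      simp only [if_true, List.length_cons]
      push_cast
      ring
    · rw [if_neg (by exact_mod_cast hc)]
      have : (decide (pvD (xs.take (j+1)) = pvD (xs.drop (j+1)))) = false := by simp [hc]
      rw [this]
      rw [ih (j+1) a (by omega)]
      simp

theorem pvSolution_eq (topping : List Int) :
    solution topping
      = (((List.range topping.length).filter (fun k => decide (pvD (topping.take k) = pvD (topping.drop k)))).length : Int) := by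
  show pvLoopA topping.reverse _ PySem.Dict.empty 0 = _
  rw [pvChBuild]
  have h1 : PySem.Dict.counter topping = PySem.Dict.counter topping.reverse.reverse := by
    rw [List.reverse_reverse]
  have h2 : (PySem.Dict.empty : PySem.Dict Int Int) = PySem.Dict.counter [] := rfl
  rw [h1, h2, pvLoopA_eq topping.reverse [] 0]
  have h3 : topping.reverse = (topping.take topping.length).reverse := by
    rw [List.take_length]
  rw [h3, pvG_eq topping topping.length [] (le_refl _) (by simp)]
  ring

theorem pvSolutionAlt_eq (topping : List Int) (h : topping ≠ []) :
    solution_alt topping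
      = (((List.range' 1 (topping.length - 1)).filter (fun k => decide (pvD (topping.take k) = pvD (topping.drop k)))).length : Int) := by
  show pvFwd (topping.zip (PySem.List.slice ((pvSuffix topping.reverse PySem.Set.empty).reverse) (some 1) none)) PySem.Set.empty 0 = _
  rw [PySem.List.slice_from _ (by norm_num : (0:Int) ≤ 1), pvSuffix_reverse]
  have hn : topping.length = (topping.length - 1) + 1 := by
    cases topping with
    | nil => exact absurd rfl h
    | cons y ys => simp
  have hr : (List.range topping.length) = 0 :: List.range' 1 (topping.length - 1) := by
    rw [List.range_eq_range', hn, List.range'_succ]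
    simp
  rw [hr]
  show pvFwd (topping.zip (((List.range' 1 (topping.length - 1)).map fun i => ((pvD (topping.drop i) : Int))).drop ((1:Int).toNat - 1))) PySem.Set.empty 0 = _
  simp only [Int.toNat_one, Nat.sub_self, List.drop_zero]
  have he : (PySem.Set.empty : PySem.Set Int) = PySem.Set.ofList (topping.take 0) := rfl
  rw [he]
  have := pvFwd_spec topping (topping.length - 1) 0 0 (by omega)
  simp only [List.drop_zero, Nat.zero_add] at this
  rw [this]
  ring

-- ===== VERDICT (by name: the statement is the Claim_ definition above) =====
theorem solution_spec : Claim_equal_solution := by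
  intro topping _ hpre
  unfold Spec_solution
  rw [pvSolution_eq topping, pvSolutionAlt_eq topping hpre]
  have hn : topping.length = (topping.length - 1) + 1 := by
    cases topping with
    | nil => exact absurd rfl hpre
    | cons y ys => simp
  have hr : (List.range topping.length) = 0 :: List.range' 1 (topping.length - 1) := by
    rw [List.range_eq_range', hn, List.range'_succ]
    simp
  rw [hr, List.filter_cons]
  have h0 : ¬ (pvD ([] : List Int) = pvD topping) := by
    simp only [pvD, List.toFinset_nil, Finset.card_empty]
    have := Finset.card_pos.mpr ((List.toFinset_nonempty_iff topping).mpr hpre)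
    omega
  simp [h0]
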